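-- pv_equiv track=rewrite | github.com/JonathanArrance/OpenHCI | component/nova/storage.py | find_available_mountpoint
-- ===== SOURCE A (Python) =====
-- def find_available_mountpoint(used_list):
--     """
--     DESC: Find the first available mount point based on the given list of used mountpoints.
--     INPUT: used_list - list of lists (or DictRows) to used mount points
--     OUTPUT: a mountpoint - success
--             None - if no available mount points were found
--     NOTE: If the list is empty it should not be an empty list of lists, just an empty list.
--           A list of lists or list of DictRows is fine.
--     """
--     complete_list = ["/dev/vdc", "/dev/vdd", "/dev/vde", "/dev/vdf", "/dev/vdg", "/dev/vdh", "/dev/vdi", "/dev/vdj",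
--                      "/dev/vdk", "/dev/vdl", "/dev/vdm", "/dev/vdn", "/dev/vdo", "/dev/vdp", "/dev/vdq", "/dev/vdr",
--                      "/dev/vds", "/dev/vdt", "/dev/vdu", "/dev/vdv", "/dev/vdw", "/dev/vdx", "/dev/vdy", "/dev/vdz"]
--
--     # Since this is a list of lists, we need to check if there is anything in the list first. If there isn't
--     # anything there then just return the first device from this complete list.
--     num_items = len(used_list)
--     if (num_items < 1):
--         return (complete_list[0])
--
--     # Loop through the complete list until we don't find a match which means its available to be used.
--     found = None
--     for index in range (len(complete_list)):
--         if (any(complete_list[index] in x[0] for x in used_list)):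
--             continue
--         else:
--             found = complete_list[index]
--             break
--
--     return (found)
-- ===== SOURCE B (Python) =====
-- def find_available_mountpoint(used_list):
--     complete_list = ["/dev/vdc", "/dev/vdd", "/dev/vde", "/dev/vdf", "/dev/vdg", "/dev/vdh", "/dev/vdi", "/dev/vdj",
--                      "/dev/vdk", "/dev/vdl", "/dev/vdm", "/dev/vdn", "/dev/vdo", "/dev/vdp", "/dev/vdq", "/dev/vdr",
--                      "/dev/vds", "/dev/vdt", "/dev/vdu", "/dev/vdv", "/dev/vdw", "/dev/vdx", "/dev/vdy", "/dev/vdz"]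
--     # One pass over used_list building the set of devices that appear in some used entry,
--     # then one pass over complete_list returning the first device not in that set.
--     used = set()
--     for x in used_list:
--         for d in complete_list:
--             if d in x[0]:
--                 used.add(d)
--     for d in complete_list:
--         if d not in used:
--             return d
--     return None
-- ===== Notes on version B (the rewrite author's own statement) =====
-- stated objective: simpler
-- what changed: Instead of scanning used_list afresh for each of the 24 devices (with any() inside a range loop, continue/break and a found accumulator), B makes one pass over used_list building a set of used devices and then returns the first device absent from it; the empty-list special case disappears.
import Mathlib
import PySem

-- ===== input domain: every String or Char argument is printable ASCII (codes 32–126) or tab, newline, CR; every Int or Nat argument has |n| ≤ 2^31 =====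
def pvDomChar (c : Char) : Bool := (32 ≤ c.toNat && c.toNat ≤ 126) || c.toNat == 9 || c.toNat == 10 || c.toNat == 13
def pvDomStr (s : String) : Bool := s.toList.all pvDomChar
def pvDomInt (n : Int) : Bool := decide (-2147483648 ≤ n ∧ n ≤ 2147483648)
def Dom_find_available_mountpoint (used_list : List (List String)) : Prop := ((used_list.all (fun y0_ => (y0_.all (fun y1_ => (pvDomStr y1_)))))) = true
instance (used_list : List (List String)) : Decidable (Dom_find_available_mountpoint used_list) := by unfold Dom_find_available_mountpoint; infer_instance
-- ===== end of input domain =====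

-- B replaces A's per-device scans of used_list (any() inside a range loop with continue/break)
-- by one pass building a set of used devices and one lookup pass: simpler, same result.

-- the fixed device list shared verbatim by both programs (the literal constant of the source)
def completeList : List String :=
  ["/dev/vdc", "/dev/vdd", "/dev/vde", "/dev/vdf", "/dev/vdg", "/dev/vdh", "/dev/vdi", "/dev/vdj",
   "/dev/vdk", "/dev/vdl", "/dev/vdm", "/dev/vdn", "/dev/vdo", "/dev/vdp", "/dev/vdq", "/dev/vdr",
   "/dev/vds", "/dev/vdt", "/dev/vdu", "/dev/vdv", "/dev/vdw", "/dev/vdx", "/dev/vdy", "/dev/vdz"]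

-- ===== PORT A =====
-- the for-index loop with continue/break: first device d with no match in used_list, else None.
-- x[0] is total under Pre_ (no empty inner list); ported as x.headD "".
def aLoop (cl : List String) (used_list : List (List String)) : Option String :=
  match cl with
  | [] => none
  | d :: rest =>
    if used_list.any (fun x => PySem.Str.isIn d (x.headD "")) then aLoop rest used_list
    else some d

def find_available_mountpoint (used_list : List (List String)) : Option String :=
  if used_list.length < 1 then some (completeList.headD "")
  else aLoop completeList used_list

-- ===== PORT B =====
-- one pass over used_list building the set of used devices
def buildUsed (used_list : List (List String)) : PySem.Set String :=
  used_list.foldl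
    (fun s x => completeList.foldl
      (fun s d => if PySem.Str.isIn d (x.headD "") then s.add d else s) s)
    PySem.Set.empty

-- one lookup pass: first device not in the set
def findFree (cl : List String) (used : PySem.Set String) : Option String :=
  match cl with
  | [] => none
  | d :: rest => if used.contains d then findFree rest used else some d

def find_available_mountpoint_alt (used_list : List (List String)) : Option String :=
  findFree completeList (buildUsed used_list)

-- ===== PRECONDITION & SPEC =====
-- Pre_ excludes lists containing an empty inner list: on those x[0] raises IndexError in B
-- (and in A whenever the scan reaches it; where A's short-circuit still returns, B raises).
def Pre_find_available_mountpoint (used_list : List (List String)) : Prop :=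
  ∀ x ∈ used_list, x ≠ []
instance (used_list : List (List String)) : Decidable (Pre_find_available_mountpoint used_list) := by
  unfold Pre_find_available_mountpoint; infer_instance

def pvWitness_find_available_mountpoint : List (List String) := [["/dev/vdc"]]

def Spec_find_available_mountpoint (used_list : List (List String)) (out : Option String) : Prop :=
  out = find_available_mountpoint_alt used_list
instance (used_list : List (List String)) (out : Option String) : Decidable (Spec_find_available_mountpoint used_list out) := by
  unfold Spec_find_available_mountpoint; infer_instance

-- ===== CLAIM (what is proved, stated in full; the proofs are below) =====
def Claim_equal_find_available_mountpoint : Prop := ∀ (used_list : List (List String)), Dom_find_available_mountpoint used_list → Pre_find_available_mountpoint used_list → Spec_find_available_mountpoint used_list (find_available_mountpoint used_list)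

-- ===== LEMMAS AND PROOFS =====

-- membership in the inner fold over completeList
lemma mem_innerFold (p : String → Bool) (cl : List String) (s : PySem.Set String) (d : String) :
    d ∈ cl.foldl (fun s d' => if p d' then s.add d' else s) s ↔ d ∈ s ∨ (d ∈ cl ∧ p d = true) := by
  induction cl generalizing s with
  | nil => simp
  | cons c rest ih =>
    simp only [List.foldl_cons, ih, List.mem_cons]
    split_ifs with hc
    · rw [PySem.Set.mem_add]
      constructor
      · rintro ((h | rfl) | h)
        · exact Or.inl h
        · exact Or.inr ⟨Or.inl rfl, hc⟩
        · exact Or.inr ⟨Or.inr h.1, h.2⟩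
      · rintro (h | ⟨(rfl | h), hp⟩)
        · exact Or.inl (Or.inl h)
        · exact Or.inl (Or.inr rfl)
        · exact Or.inr ⟨h, hp⟩
    · constructor
      · rintro (h | h)
        · exact Or.inl h
        · exact Or.inr ⟨Or.inr h.1, h.2⟩
      · rintro (h | ⟨(rfl | h), hp⟩)
        · exact Or.inl h
        · exact absurd hp hc
        · exact Or.inr ⟨h, hp⟩

lemma mem_buildUsed_aux (ul : List (List String)) (s : PySem.Set String) (d : String) :
    d ∈ ul.foldl
        (fun s x => completeList.foldl
          (fun s d' => if PySem.Str.isIn d' (x.headD "") then s.add d' else s) s) s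
      ↔ d ∈ s ∨ (d ∈ completeList ∧ ∃ x ∈ ul, PySem.Str.isIn d (x.headD "") = true) := by
  induction ul generalizing s with
  | nil => simp
  | cons x rest ih =>
    simp only [List.foldl_cons, ih, mem_innerFold, List.mem_cons]
    constructor
    · rintro ((h | ⟨hd, hp⟩) | ⟨hd, y, hy, hp⟩)
      · exact Or.inl h
      · exact Or.inr ⟨hd, x, Or.inl rfl, hp⟩
      · exact Or.inr ⟨hd, y, Or.inr hy, hp⟩
    · rintro (h | ⟨hd, y, (rfl | hy), hp⟩)
      · exact Or.inl (Or.inl h)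
      · exact Or.inl (Or.inr ⟨hd, hp⟩)
      · exact Or.inr ⟨hd, y, hy, hp⟩

lemma mem_buildUsed (ul : List (List String)) (d : String) :
    d ∈ buildUsed ul ↔ d ∈ completeList ∧ ∃ x ∈ ul, PySem.Str.isIn d (x.headD "") = true := by
  unfold buildUsed
  rw [mem_buildUsed_aux]
  simp [PySem.Set.empty]

-- the two scans of the device list agree, device by device
lemma loops_eq (ul : List (List String)) (cl : List String) (hsub : ∀ d ∈ cl, d ∈ completeList) :
    aLoop cl ul = findFree cl (buildUsed ul) := by
  induction cl with
  | nil => rfl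
  | cons d rest ih =>
    have hmem : (buildUsed ul).contains d = ul.any (fun x => PySem.Str.isIn d (x.headD "")) := by
      by_cases h : ul.any (fun x => PySem.Str.isIn d (x.headD "")) = true
      · rw [h]
        obtain ⟨y, hy, hp⟩ := List.any_eq_true.mp h
        exact (PySem.Set.contains_iff _ _).mpr
          ((mem_buildUsed ul d).mpr ⟨hsub d (List.mem_cons_self ..), y, hy, hp⟩)
      · rw [Bool.not_eq_true] at h
        rw [h, ← Bool.not_eq_true]
        intro hc
        obtain ⟨-, y, hy, hp⟩ := (mem_buildUsed ul d).mp ((PySem.Set.contains_iff _ _).mp hc)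
        have hany : (ul.any fun x => PySem.Str.isIn d (x.headD "")) = true :=
          List.any_eq_true.mpr ⟨y, hy, hp⟩
        rw [h] at hany
        exact Bool.false_ne_true hany
    simp only [aLoop, findFree, hmem]
    split_ifs with h
    · exact ih (fun d' hd' => hsub d' (List.mem_cons_of_mem _ hd'))
    · rfl

-- ===== VERDICT (by name: the statement is the Claim_ definition above) =====
theorem find_available_mountpoint_spec : Claim_equal_find_available_mountpoint := by
  intro ul _ _
  unfold Spec_find_available_mountpoint find_available_mountpoint find_available_mountpoint_alt
  split_ifs with h
  · -- used_list = []: B's set is empty, the first device is free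
    have : ul = [] := List.eq_nil_of_length_eq_zero (by omega)
    subst this
    rfl
  · exact loops_eq ul completeList (fun _ h => h)
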